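-- pv_equiv track=rewrite | github.com/fedlucchetti/ConnectomeViewer | window/plot_msmode.py | _safe_name_fragment
-- ===== SOURCE A (Python) =====
-- def _safe_name_fragment(text):
--     token = str(text or "").strip()
--     if not token:
--         return "gradient"
--     cleaned = []
--     for ch in token:
--         if ch.isalnum() or ch in {"-", "_"}:
--             cleaned.append(ch)
--         else:
--             cleaned.append("_")
--     out = "".join(cleaned).strip("_")
--     while "__" in out:
--         out = out.replace("__", "_")
--     return out or "gradient"
-- ===== SOURCE B (Python) =====
-- def _safe_name_fragment(text):
--     token = str(text or "").strip()
--     if not token: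
--         return "gradient"
--     pieces = []
--     prev_us = False
--     for ch in token:
--         if ch.isalnum() or ch == "-":
--             pieces.append(ch)
--             prev_us = False
--         else:
--             if not prev_us:
--                 pieces.append("_")
--             prev_us = True
--     out = "".join(pieces).strip("_")
--     return out or "gradient"
-- ===== Notes on version B (the rewrite author's own statement) =====
-- stated objective: simpler
-- what changed: Replaces A's three-stage pipeline (classify every char into a list, then strip underscores, then a while-loop of repeated double-underscore replacement passes to collapse runs) by one pass with a last-was-underscore flag that collapses underscore runs inline, followed by a single underscore strip.
import Mathlib
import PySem

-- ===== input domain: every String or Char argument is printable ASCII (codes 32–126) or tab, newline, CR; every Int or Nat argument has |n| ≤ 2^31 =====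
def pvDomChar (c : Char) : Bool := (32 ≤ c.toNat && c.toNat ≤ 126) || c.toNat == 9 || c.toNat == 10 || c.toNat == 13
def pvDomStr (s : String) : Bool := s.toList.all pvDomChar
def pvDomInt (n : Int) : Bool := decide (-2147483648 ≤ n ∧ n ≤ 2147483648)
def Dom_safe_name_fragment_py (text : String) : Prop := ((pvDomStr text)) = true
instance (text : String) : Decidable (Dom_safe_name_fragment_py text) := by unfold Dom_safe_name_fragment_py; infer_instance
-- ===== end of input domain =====

-- B replaces A's classify-then-strip-then-while-replace('__','_') pipeline by a single pass with a
-- last-was-underscore flag that collapses underscore runs inline, followed by one strip('_').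

-- ===== PORT A =====
-- the `while "__" in out: out = out.replace("__", "_")` loop; fuel = len(out) suffices since each
-- pass strictly shortens the string (guard only makes the same computation total)
def pyWhileCollapse : Nat → String → String
  | 0, out => out
  | fuel + 1, out =>
    if PySem.Str.isIn "__" out then pyWhileCollapse fuel (PySem.Str.replace out "__" "_")
    else out

def safe_name_fragment_py (text : String) : String :=
  let token := PySem.Str.strip text        -- str(text or "").strip(): str(text) = text; strip "" = ""
  if token = "" then "gradient"
  else
    let cleaned := token.toList.map
      (fun ch => if PySem.Chars.isalnum ch || ch == '-' || ch == '_' then ch else '_')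
    let out := PySem.Str.stripChars (String.ofList cleaned) "_"
    let out2 := pyWhileCollapse out.toList.length out
    if out2 = "" then "gradient" else out2

-- ===== PORT B =====
-- one pass: keep alnum and '-', map any other char to '_' but emit it only if the previous
-- emitted char was not already '_' (prev = last-was-underscore flag)
def altLoop : List Char → Bool → List Char
  | [], _ => []
  | c :: t, prev =>
    if PySem.Chars.isalnum c || c == '-' then c :: altLoop t false
    else if prev then altLoop t true
    else '_' :: altLoop t true

def safe_name_fragment_py_alt (text : String) : String :=
  let token := PySem.Str.strip text
  if token = "" then "gradient"
  else
    let out := PySem.Str.stripChars (String.ofList (altLoop token.toList false)) "_"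
    if out = "" then "gradient" else out

-- ===== PRECONDITION & SPEC =====
def Spec_safe_name_fragment_py (text : String) (out : String) : Prop := out = safe_name_fragment_py_alt text
instance (text : String) (out : String) : Decidable (Spec_safe_name_fragment_py text out) := by unfold Spec_safe_name_fragment_py; infer_instance

-- ===== CLAIM (what is proved, stated in full; the proofs are below) =====
def Claim_equal_safe_name_fragment_py : Prop := ∀ (text : String), Dom_safe_name_fragment_py text → Spec_safe_name_fragment_py text (safe_name_fragment_py text)

-- ===== LEMMAS AND PROOFS =====

-- collapse runs of '_' to a single '_'; the flag says whether the previously emitted char was '_'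
def col : Bool → List Char → List Char
  | _, [] => []
  | p, c :: t => if c == '_' then (if p then col true t else '_' :: col true t) else c :: col false t

-- structural description of replace(s, "__", "_") (one left-to-right pass)
def R' : List Char → List Char
  | [] => []
  | [c] => [c]
  | c1 :: c2 :: t => if c1 == '_' && c2 == '_' then '_' :: R' t else c1 :: R' (c2 :: t)

def lastFlag : Bool → List Char → Bool
  | p, [] => p
  | _, c :: t => lastFlag (c == '_') t

theorem col_append (a b : List Char) (p : Bool) :
    col p (a ++ b) = col p a ++ col (lastFlag p a) b := by
  induction a generalizing p with
  | nil => simp [col, lastFlag]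
  | cons c t ih =>
    simp only [List.cons_append, col, lastFlag]
    cases hc : (c == '_') <;> cases p <;> simp [hc, ih]

theorem col_true_eq (t : List Char) (h : t.head? ≠ some '_') : col true t = col false t := by
  cases t with
  | nil => rfl
  | cons c t' =>
    have hc : (c == '_') = false := by
      simp only [List.head?] at h; simp [beq_eq_false_iff_ne]; intro hc; exact h (by rw [hc])
    simp [col, hc]

theorem lastFlag_reverse_cons (t : List Char) :
    lastFlag false (t.reverse) = (t.head? == some '_') := by
  cases t with
  | nil => simp [lastFlag]
  | cons c t' =>
    have : ∀ (a : List Char) (p : Bool), lastFlag p (a ++ [c]) = (c == '_') := by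
      intro a; induction a with
      | nil => intro p; simp [lastFlag]
      | cons x xs ih => intro p; simp [lastFlag, ih]
    simp only [List.reverse_cons, this]
    cases hc : (c == '_') <;> simp_all

theorem col_reverse (s : List Char) : col false s.reverse = (col false s).reverse := by
  induction s with
  | nil => rfl
  | cons c t ih =>
    rw [List.reverse_cons, col_append, ih, lastFlag_reverse_cons]
    by_cases hc : c = '_'
    · subst hc
      cases ht : t.head? with
      | none =>
        cases t with
        | nil => simp [col]
        | cons x xs => simp at ht
      | some d =>
        by_cases hd : d = '_'
        · subst hd
          cases t with
          | nil => simp at ht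
          | cons x xs =>
            simp only [List.head?] at ht
            obtain rfl : x = '_' := by injection ht
            simp [col]
        · have hne : t.head? ≠ some '_' := by rw [ht]; intro h; exact hd (by injection h)
          have hb : ((some d == some '_') : Bool) = false := by
            simp [beq_eq_false_iff_ne]; exact hd
          have hct : col false ('_' :: t) = '_' :: col false t := by
            have h1 : col false ('_' :: t) = '_' :: col true t := by simp [col]
            rw [h1, col_true_eq t hne]
          rw [hb, hct]
          simp [col]
    · have hcb : (c == '_') = false := by simp [beq_eq_false_iff_ne]; exact hc
      simp only [col, hcb, Bool.false_eq_true, if_false]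
      cases h : (t.head? == some '_') <;> simp [col, hcb]

theorem R'_head (c : Char) (t : List Char) : ∃ u, R' (c :: t) = c :: u := by
  cases t with
  | nil => exact ⟨[], rfl⟩
  | cons c2 t' =>
    by_cases h : c = '_' ∧ c2 = '_'
    · obtain ⟨rfl, rfl⟩ := h
      exact ⟨R' t', by simp [R']⟩
    · have hb : (c == '_' && c2 == '_') = false := by
        cases hx : (c == '_') <;> cases hy : (c2 == '_') <;> simp_all
      exact ⟨R' (c2 :: t'), by simp [R', hb]⟩

theorem col_R' (s : List Char) (p : Bool) : col p (R' s) = col p s := by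
  induction s using R'.induct generalizing p with
  | case1 => rfl
  | case2 c => rfl
  | case3 c1 c2 t h ih =>
    obtain ⟨rfl, rfl⟩ : c1 = '_' ∧ c2 = '_' := by simpa using h
    have hR : R' ('_' :: '_' :: t) = '_' :: R' t := by simp [R']
    rw [hR]
    cases p <;> simp [col, ih true]
  | case4 c1 c2 t h ih =>
    have hb : (c1 == '_' && c2 == '_') = false := by simpa using h
    have hR : R' (c1 :: c2 :: t) = c1 :: R' (c2 :: t) := by simp [R', hb]
    rw [hR]
    by_cases hc1 : c1 = '_'
    · subst hc1
      have hc2 : c2 ≠ '_' := by intro hc; subst hc; simp at hb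
      obtain ⟨u, hu⟩ := R'_head c2 t
      have hh : (R' (c2 :: t)).head? ≠ some '_' := by rw [hu]; intro hx; exact hc2 (by injection hx)
      have hh2 : (c2 :: t).head? ≠ some '_' := by intro hx; exact hc2 (by injection hx)
      have e1 : col true (R' (c2 :: t)) = col true (c2 :: t) := by
        rw [col_true_eq _ hh, col_true_eq _ hh2, ih false]
      cases p <;> simp [col, e1]
    · have hcb : (c1 == '_') = false := by simp [beq_eq_false_iff_ne]; exact hc1
      cases p <;> simp [col, hcb, ih false]

theorem R'_length_le (s : List Char) : (R' s).length ≤ s.length := by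
  induction s using R'.induct with
  | case1 => simp [R']
  | case2 c => simp [R']
  | case3 c1 c2 t h ih =>
    obtain ⟨rfl, rfl⟩ : c1 = '_' ∧ c2 = '_' := by simpa using h
    have hR : R' ('_' :: '_' :: t) = '_' :: R' t := by simp [R']
    rw [hR]; simp; omega
  | case4 c1 c2 t h ih =>
    have hb : (c1 == '_' && c2 == '_') = false := by simpa using h
    have hR : R' (c1 :: c2 :: t) = c1 :: R' (c2 :: t) := by simp [R', hb]
    rw [hR]; simpa using ih

theorem R'_length_lt (s : List Char) (h : ['_', '_'] <:+: s) : (R' s).length < s.length := by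
  induction s using R'.induct with
  | case1 => have := h.length_le; simp at this
  | case2 c => have := h.length_le; simp at this
  | case3 c1 c2 t hb ih =>
    obtain ⟨rfl, rfl⟩ : c1 = '_' ∧ c2 = '_' := by simpa using hb
    have hR : R' ('_' :: '_' :: t) = '_' :: R' t := by simp [R']
    rw [hR]
    have := R'_length_le t; simp; omega
  | case4 c1 c2 t hb ih =>
    have hbf : (c1 == '_' && c2 == '_') = false := by simpa using hb
    have hR : R' (c1 :: c2 :: t) = c1 :: R' (c2 :: t) := by simp [R', hbf]
    rw [hR]
    rcases List.infix_cons_iff.mp h with hpre | hinf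
    · exfalso
      rcases List.cons_prefix_cons.mp hpre with ⟨rfl, hp2⟩
      rcases List.cons_prefix_cons.mp hp2 with ⟨rfl, _⟩
      simp at hbf
    · have := ih hinf; simp at this ⊢; omega

theorem col_no_infix (s : List Char) (h : ¬ (['_', '_'] <:+: s)) : col false s = s := by
  induction s with
  | nil => rfl
  | cons c t ih =>
    have ht : ¬ (['_', '_'] <:+: t) := fun hx => h (List.infix_cons_iff.mpr (Or.inr hx))
    by_cases hc : c = '_'
    · subst hc
      have hh : t.head? ≠ some '_' := by
        intro hx
        cases t with
        | nil => simp at hx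
        | cons d t' =>
          obtain rfl : d = '_' := by simpa using hx
          exact h (List.infix_cons_iff.mpr (Or.inl (by simp)))
      have h1 : col false ('_' :: t) = '_' :: col true t := by simp [col]
      rw [h1, col_true_eq t hh, ih ht]
    · have hcb : (c == '_') = false := by simp [beq_eq_false_iff_ne]; exact hc
      simp [col, hcb, ih ht]

theorem go_eq (fuel : Nat) (l acc : List Char) (h : l.length ≤ fuel) :
    PySem.Chars.replace.go ['_', '_'] ['_'] fuel l acc = acc.reverse ++ R' l := by
  induction fuel generalizing l acc with
  | zero =>
    obtain rfl : l = [] := by simpa using List.length_eq_zero_iff.mp (Nat.le_zero.mp h)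
    simp [PySem.Chars.replace.go, R']
  | succ fuel ih =>
    cases l with
    | nil => simp [PySem.Chars.replace.go, R']
    | cons c t =>
      rw [PySem.Chars.replace.go]
      by_cases hp : List.isPrefixOf ['_', '_'] (c :: t) = true
      · have hpre : ['_', '_'] <+: c :: t := List.isPrefixOf_iff_prefix.mp hp
        rcases List.cons_prefix_cons.mp hpre with ⟨rfl, hp2⟩
        cases t with
        | nil => simp at hp2
        | cons c2 t' =>
          rcases List.cons_prefix_cons.mp hp2 with ⟨rfl, _⟩
          simp only [hp, if_true]
          have hlen : t'.length ≤ fuel := by simp at h; omega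
          rw [show List.drop (['_', '_'] : List Char).length ('_' :: '_' :: t') = t' by simp]
          rw [ih t' (['_'].reverse ++ acc) hlen]
          simp [R']
      · simp only [hp, if_false]
        have hlen : t.length ≤ fuel := by simp at h; omega
        rw [ih t (c :: acc) hlen]
        have hR : R' (c :: t) = c :: R' t := by
          cases t with
          | nil => rfl
          | cons c2 t' =>
            have hb : (c == '_' && c2 == '_') = false := by
              by_contra hx
              apply hp
              have : c = '_' ∧ c2 = '_' := by
                simp only [Bool.not_eq_false] at hx; simpa using hx
              obtain ⟨rfl, rfl⟩ := this
              simp [List.isPrefixOf]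
            simp [R', hb]
        rw [hR]; simp
    
theorem replace_eq_R' (s : List Char) : PySem.Chars.replace s ['_', '_'] ['_'] = R' s := by
  rw [PySem.Chars.replace]
  simp only [List.isEmpty_cons, if_false]
  exact go_eq s.length s [] le_rfl

theorem pyWhileCollapse_eq (fuel : Nat) (out : String) (h : out.toList.length ≤ fuel) :
    (pyWhileCollapse fuel out).toList = col false out.toList := by
  induction fuel generalizing out with
  | zero =>
    have : out.toList = [] := List.length_eq_zero_iff.mp (Nat.le_zero.mp h)
    simp [pyWhileCollapse, this, col]
  | succ fuel ih =>
    rw [pyWhileCollapse]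
    by_cases hin : PySem.Str.isIn "__" out = true
    · have hinf : ['_', '_'] <:+: out.toList := by
        have := (PySem.Str.isIn_iff_infix _ _).mp hin
        simpa using this
      simp only [hin, if_true]
      have htl : (PySem.Str.replace out "__" "_").toList = R' out.toList := by
        rw [PySem.Str.toList_replace]
        have h1 : ("__" : String).toList = ['_', '_'] := by decide
        have h2 : ("_" : String).toList = ['_'] := by decide
        rw [h1, h2, replace_eq_R']
      have hlt : (PySem.Str.replace out "__" "_").toList.length ≤ fuel := by
        rw [htl]
        have := R'_length_lt out.toList hinf
        omega
      rw [ih _ hlt, htl, col_R']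
    · have hninf : ¬ (['_', '_'] <:+: out.toList) := by
        intro hx
        apply hin
        apply (PySem.Str.isIn_iff_infix _ _).mpr
        simpa using hx
      have hf : PySem.Str.isIn "__" out = false := by simpa using hin
      rw [hf]
      simp [col_no_infix _ hninf]

theorem altLoop_eq_col (l : List Char) (prev : Bool) :
    altLoop l prev =
      col prev (l.map (fun ch => if PySem.Chars.isalnum ch || ch == '-' || ch == '_' then ch else '_')) := by
  induction l generalizing prev with
  | nil => rfl
  | cons c t ih =>
    simp only [List.map_cons]
    by_cases hg : (PySem.Chars.isalnum c || c == '-') = true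
    · have hne : c ≠ '_' := by
        intro hc; subst hc; revert hg; decide
      have hf : (if PySem.Chars.isalnum c || c == '-' || c == '_' then c else '_') = c := by
        simp [hg]
      have hcb : (c == '_') = false := by simp [beq_eq_false_iff_ne]; exact hne
      rw [hf]
      simp only [altLoop, hg, if_true, col, hcb, Bool.false_eq_true, if_false]
      rw [ih false]
    · have hf : (if PySem.Chars.isalnum c || c == '-' || c == '_' then c else '_') = '_' := by
        by_cases hc : c = '_'
        · subst hc; simp
        · have : (PySem.Chars.isalnum c || c == '-' || c == '_') = false := by
            simp only [Bool.or_eq_false_iff]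
            constructor
            · simpa using hg
            · simp [beq_eq_false_iff_ne]; exact hc
          simp [this]
      rw [hf]
      simp only [altLoop, hg, Bool.false_eq_true, if_false, col, beq_self_eq_true, if_true]
      cases prev <;> simp [ih true]

def pu : Char → Bool := fun c => (['_'] : List Char).contains c

theorem pu_eq (c : Char) : pu c = (c == '_') := by
  show List.contains ['_'] c = (c == '_')
  rw [Bool.eq_iff_iff]
  simp

theorem col_dropWhile (s : List Char) (p : Bool) :
    col false (s.dropWhile pu) = (col p s).dropWhile pu := by
  induction s generalizing p with
  | nil => cases p <;> rfl
  | cons c t ih =>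
    by_cases hc : c = '_'
    · subst hc
      have hpu : pu '_' = true := by decide
      have h1 : List.dropWhile pu ('_' :: t) = List.dropWhile pu t :=
        List.dropWhile_cons_of_pos hpu
      rw [h1, ih true]
      have h2 : col p ('_' :: t) = if p then col true t else '_' :: col true t := by simp [col]
      cases p
      · rw [h2]
        simp only [Bool.false_eq_true, if_false]
        rw [List.dropWhile_cons_of_pos hpu]
      · rw [h2]
        simp
    · have hpu : pu c = false := by rw [pu_eq]; simp [beq_eq_false_iff_ne]; exact hc
      have hcb : (c == '_') = false := by simp [beq_eq_false_iff_ne]; exact hc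
      simp [List.dropWhile_cons, hpu, col, hcb]

theorem col_stripChars (m : List Char) :
    col false (PySem.Chars.stripChars m ['_']) = PySem.Chars.stripChars (col false m) ['_'] := by
  show col false ((((m.dropWhile pu).reverse).dropWhile pu).reverse)
      = (((((col false m).dropWhile pu)).reverse).dropWhile pu).reverse
  rw [col_reverse, col_dropWhile _ false, col_reverse, col_dropWhile _ false]

theorem toList_eq_main (token : String) :
    (pyWhileCollapse
        (PySem.Str.stripChars
          (String.ofList (token.toList.map
            (fun ch => if PySem.Chars.isalnum ch || ch == '-' || ch == '_' then ch else '_'))) "_").toList.length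
        (PySem.Str.stripChars
          (String.ofList (token.toList.map
            (fun ch => if PySem.Chars.isalnum ch || ch == '-' || ch == '_' then ch else '_'))) "_")).toList
      = (PySem.Str.stripChars (String.ofList (altLoop token.toList false)) "_").toList := by
  set m := token.toList.map
    (fun ch => if PySem.Chars.isalnum ch || ch == '-' || ch == '_' then ch else '_') with hm
  rw [pyWhileCollapse_eq _ _ le_rfl]
  rw [PySem.Str.toList_stripChars, PySem.Str.toList_stripChars]
  have hus : ("_" : String).toList = ['_'] := by decide
  rw [hus]
  have hmk : ∀ l : List Char, (String.ofList l).toList = l := fun l => String.toList_ofList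
  rw [hmk, hmk, altLoop_eq_col, ← hm, col_stripChars]

theorem string_toList_inj {s t : String} (h : s.toList = t.toList) : s = t := by
  have := congrArg String.ofList h
  rwa [String.ofList_toList, String.ofList_toList] at this

-- ===== VERDICT (by name: the statement is the Claim_ definition above) =====
theorem safe_name_fragment_py_spec : Claim_equal_safe_name_fragment_py := by
  intro text _
  show safe_name_fragment_py text = safe_name_fragment_py_alt text
  unfold safe_name_fragment_py safe_name_fragment_py_alt
  by_cases ht : PySem.Str.strip text = ""
  · simp [ht]
  · simp only [ht, if_false]
    have key := string_toList_inj (toList_eq_main (PySem.Str.strip text))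
    rw [key]
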